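-- pv_equiv track=rewrite | github.com/rf-iasys/OEIS | OEIS_A000071.py | A000071
-- ===== SOURCE A (Python) =====
-- def A000071(n):
--     marked = []
--     k1 = 1
--     k2 = 1
--
--     while len(marked) < n:
--         k1 += k2 - 2*k1
--         k2 += k1 - 1
--         marked.append(abs(k1))
--
--     return marked
-- ===== SOURCE B (Python) =====
-- def A000071(n):
--     m = max(n, 0)
--     # stage 1: Fibonacci table F_0..F_{m-1} (at least the seed [0, 1])
--     fibs = [0, 1]
--     for i in range(2, m):
--         fibs.append(fibs[i - 1] + fibs[i - 2])
--     # stage 2: prefix sums, using sum(F_0..F_{k-1}) = F_{k+1} - 1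
--     out, total = [], 0
--     for f in fibs[:m]:
--         out.append(total)
--         total += f
--     return out
-- ===== Notes on version B (the rewrite author's own statement) =====
-- stated objective: alternative
-- what changed: B works in two staged passes: it first builds an explicit Fibonacci table F_0..F_{m-1} by list indexing, then emits the answer as the running prefix sums of that table (sum F_0..F_{k-1} = F_{k+1}-1), instead of A's single-pass mutated (k1,k2) pair with abs().
import Mathlib
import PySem

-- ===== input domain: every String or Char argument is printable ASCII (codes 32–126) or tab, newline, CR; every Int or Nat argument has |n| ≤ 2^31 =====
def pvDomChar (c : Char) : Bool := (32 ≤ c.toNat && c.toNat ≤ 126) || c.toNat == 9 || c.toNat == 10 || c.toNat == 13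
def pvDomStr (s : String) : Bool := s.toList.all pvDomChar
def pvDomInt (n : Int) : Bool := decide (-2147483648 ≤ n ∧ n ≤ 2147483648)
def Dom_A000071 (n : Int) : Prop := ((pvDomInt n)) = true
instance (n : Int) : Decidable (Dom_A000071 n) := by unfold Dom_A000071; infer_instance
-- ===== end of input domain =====

-- B builds an explicit Fibonacci table and emits its prefix sums (two staged passes) instead of A's single-pass mutated (k1,k2) pair with abs() (objective: alternative).

-- ===== PORT A =====
-- A's while-loop appends one element per iteration, so `while len(marked) < n`
-- runs exactly n.toNat times; fuel = remaining iterations, state carried literally.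
def A000071.loop : Nat → List Int → Int → Int → List Int
  | 0, marked, _, _ => marked
  | m + 1, marked, k1, k2 =>
      let k1' := k1 + (k2 - 2 * k1)
      let k2' := k2 + (k1' - 1)
      A000071.loop m (marked ++ [|k1'|]) k1' k2'

def A000071 (n : Int) : List Int := A000071.loop n.toNat [] 1 1

-- ===== PORT B =====
def A000071_alt (n : Int) : List Int :=
  let m : Nat := (max n 0).toNat
  -- stage 1: for i in range(2, m): fibs.append(fibs[i-1] + fibs[i-2])
  let fibs : List Int :=
    (PySem.List.pyRange 2 (m : Int) 1).foldl
      (fun fibs i =>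
        fibs ++ [(PySem.List.pyGet? fibs (i - 1)).getD 0 +
                 (PySem.List.pyGet? fibs (i - 2)).getD 0])
      [0, 1]
  -- stage 2: for f in fibs[:m]: out.append(total); total += f
  ((PySem.List.slice fibs none (some (m : Int))).foldl
      (fun (p : List Int × Int) f => (p.1 ++ [p.2], p.2 + f))
      ([], 0)).1

-- ===== PRECONDITION & SPEC =====
def Spec_A000071 (n : Int) (out : List Int) : Prop := out = A000071_alt n
instance (n : Int) (out : List Int) : Decidable (Spec_A000071 n out) := by unfold Spec_A000071; infer_instance

-- ===== CLAIM (what is proved, stated in full; the proofs are below) =====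
def Claim_equal_A000071 : Prop := ∀ (n : Int), Dom_A000071 n → Spec_A000071 n (A000071 n)

-- ===== LEMMAS AND PROOFS =====

-- Reference: the k-th element of the Fibonacci chain starting (a, b).
def pvF : Nat → Int → Int → Int
  | 0, a, _ => a
  | k + 1, _a, b => pvF k b (_a + b)

-- Reference: the Fibonacci chain of length k starting (a, b).
def pvFib : Nat → Int → Int → List Int
  | 0, _, _ => []
  | k + 1, a, b => a :: pvFib k b (a + b)

-- Reference: the output list — k prefix sums, state (a, b) = next fib pair, t = running total.
def pvG : Nat → Int → Int → Int → List Int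
  | 0, _, _, _ => []
  | k + 1, a, b, t => t :: pvG k b (a + b) (t + a)

theorem pvF_add_two (k : Nat) (a b : Int) : pvF (k + 2) a b = pvF (k + 1) a b + pvF k a b := by
  induction k generalizing a b with
  | zero => exact add_comm a b
  | succ k ih => simpa [pvF] using ih b (a + b)

theorem pvFib_snoc (k : Nat) (a b : Int) : pvFib (k + 1) a b = pvFib k a b ++ [pvF k a b] := by
  induction k generalizing a b with
  | zero => rfl
  | succ k ih =>
      show a :: pvFib (k + 1) b (a + b) = (a :: pvFib k b (a + b)) ++ [pvF k b (a + b)]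
      rw [ih b (a + b)]
      rfl

theorem pvFib_getElem? (k j : Nat) (a b : Int) (h : j < k) :
    (pvFib k a b)[j]? = some (pvF j a b) := by
  induction k generalizing j a b with
  | zero => omega
  | succ k ih =>
      cases j with
      | zero => simp [pvFib, pvF]
      | succ j => simpa [pvFib, pvF] using ih j b (a + b) (by omega)

theorem pvFib_take (k m : Nat) (a b : Int) : (pvFib k a b).take m = pvFib (min m k) a b := by
  induction k generalizing m a b with
  | zero => simp [pvFib]
  | succ k ih =>
      cases m with
      | zero => simp [pvFib]
      | succ m => simp [pvFib, ih, Nat.succ_min_succ]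

-- A's loop, run on the state (1 + a - b, 2 - b) for a genuine fib pair (a, b),
-- appends exactly the prefix-sum list pvG with total b - a ... actually t = a - 1.
theorem A000071_loop_eq_pvG (m : Nat) (a b : Int) (marked : List Int)
    (ha : 1 ≤ a) (hb : 1 ≤ b) :
    A000071.loop m marked (1 + a - b) (2 - b) = marked ++ pvG m (b - a) a (a - 1) := by
  induction m generalizing a b marked with
  | zero => simp [A000071.loop, pvG]
  | succ m ih =>
      simp only [A000071.loop, pvG]
      have h1 : (1 + a - b) + ((2 - b) - 2 * (1 + a - b)) = 1 + b - (a + b) := by ring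
      have h2 : (2 - b) + ((1 + b - (a + b)) - 1) = 2 - (a + b) := by ring
      have habs : |1 + b - (a + b)| = a - 1 := by
        have : 1 + b - (a + b) = -(a - 1) := by ring
        rw [this, abs_neg, abs_of_nonneg (by omega)]
      have hpair : pvG m a (b - a + a) (a - 1 + (b - a)) = pvG m a b (b - 1) := by
        congr 1 <;> ring
      rw [h1, h2, habs, ih b (a + b) _ hb (by omega)]
      have : a + b - b = a := by ring
      rw [this, hpair]
      simp

-- B's stage-1 fold builds exactly pvFib (max m 2) 0 1.
theorem A000071_build_eq_pvFib (m : Nat) :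
    (PySem.List.pyRange 2 (m : Int) 1).foldl
      (fun fibs i =>
        fibs ++ [(PySem.List.pyGet? fibs (i - 1)).getD 0 +
                 (PySem.List.pyGet? fibs (i - 2)).getD 0])
      [0, 1] = pvFib (max m 2) 0 1 := by
  induction m with
  | zero => simp [PySem.List.pyRange_one_eq_nil, pvFib]
  | succ m ih =>
      by_cases h2 : 2 ≤ m
      · have hmax : max m 2 = m := by omega
        rw [show ((m + 1 : Nat) : Int) = (m : Int) + 1 by push_cast; ring,
            PySem.List.pyRange_one_succ_right (by exact_mod_cast h2),
            List.foldl_append, ih, hmax]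
        have e1 : (m : Int) - 1 = ((m - 1 : Nat) : Int) := by omega
        have e2 : (m : Int) - 2 = ((m - 2 : Nat) : Int) := by omega
        rw [List.foldl_cons, List.foldl_nil, e1, e2,
            PySem.List.pyGet?_natCast, PySem.List.pyGet?_natCast,
            pvFib_getElem? m (m - 1) 0 1 (by omega),
            pvFib_getElem? m (m - 2) 0 1 (by omega)]
        have e3 : m - 1 = m - 2 + 1 := by omega
        have e4 : m = m - 2 + 2 := by omega
        simp only [Option.getD_some]
        rw [e3, ← pvF_add_two (m - 2) 0 1, ← e4, ← pvFib_snoc m 0 1]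
        have hmx : max (m + 1) 2 = m + 1 := by omega
        rw [hmx]
      · interval_cases m <;> simp [PySem.List.pyRange_one_eq_nil, pvFib]

-- B's stage-2 fold over a fib chain produces pvG (first component).
theorem A000071_sum_eq_pvG (k : Nat) (a b t : Int) (out : List Int) :
    ((pvFib k a b).foldl (fun (p : List Int × Int) f => (p.1 ++ [p.2], p.2 + f)) (out, t)).1
      = out ++ pvG k a b t := by
  induction k generalizing a b t out with
  | zero => simp [pvFib, pvG]
  | succ k ih => simp [pvFib, pvG, ih]

theorem A000071_alt_eq_pvG (n : Int) : A000071_alt n = pvG (max n 0).toNat 0 1 0 := by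
  unfold A000071_alt
  simp only [A000071_build_eq_pvFib]
  rw [PySem.List.slice_to_natCast, pvFib_take]
  have hmin : min (max n 0).toNat (max (max n 0).toNat 2) = (max n 0).toNat := by omega
  rw [hmin, A000071_sum_eq_pvG]
  simp

-- ===== VERDICT (by name: the statement is the Claim_ definition above) =====
theorem A000071_spec : Claim_equal_A000071 := by
  intro n _
  unfold Spec_A000071 A000071
  rw [A000071_alt_eq_pvG]
  have hmax : (max n 0).toNat = n.toNat := by omega
  have h := A000071_loop_eq_pvG n.toNat 1 1 [] le_rfl le_rfl
  norm_num at h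
  rw [hmax, h]
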